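-- pv_equiv track=rewrite | github.com/artmerino/artmerino.github.io | build.py | authorsListToTexString
-- ===== SOURCE A (Python) =====
-- def authorsListToTexString(authorsList):
--     authorsString = "with "
--     shortList = authorsList.copy()
--     shortList.remove("Arturo Merino")
--     n = len(shortList)
--     for i, author in enumerate(shortList):
--         if i==0:
--             authorsString += f"{author}"
--         elif i<n-1:
--             authorsString += f", {author}"
--         elif i==n-1 and n==2:
--             authorsString += f" and {author}"
--         elif i==n-1 and n>2:
--             authorsString += f", and {author}"
--     return authorsString
-- ===== SOURCE B (Python) =====
-- def authorsListToTexString(authorsList):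
--     shortList = authorsList.copy()
--     shortList.remove("Arturo Merino")
--     n = len(shortList)
--     if n == 0:
--         return "with "
--     if n == 1:
--         return "with " + shortList[0]
--     if n == 2:
--         return "with " + shortList[0] + " and " + shortList[1]
--     return "with " + ", ".join(shortList[:-1]) + ", and " + shortList[-1]
-- ===== Notes on version B (the rewrite author's own statement) =====
-- stated objective: simpler
-- what changed: Replaces the index-branching accumulation loop over enumerate() with a direct dispatch on len(shortList) (0/1/2/many) that builds the string with a single ', '.join over a slice.
import Mathlib
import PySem

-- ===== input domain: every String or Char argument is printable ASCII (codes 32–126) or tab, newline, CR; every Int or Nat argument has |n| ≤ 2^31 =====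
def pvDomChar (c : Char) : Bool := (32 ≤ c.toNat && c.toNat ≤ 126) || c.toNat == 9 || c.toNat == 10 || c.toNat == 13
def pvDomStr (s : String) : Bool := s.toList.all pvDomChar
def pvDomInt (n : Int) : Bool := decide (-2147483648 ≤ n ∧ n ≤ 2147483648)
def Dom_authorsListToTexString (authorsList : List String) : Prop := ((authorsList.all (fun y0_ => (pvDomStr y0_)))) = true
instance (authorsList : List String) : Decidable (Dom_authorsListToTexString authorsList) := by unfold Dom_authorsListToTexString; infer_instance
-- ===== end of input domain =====

-- B replaces A's index-branching accumulation loop by a direct dispatch on the length of the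
-- shortened list (0/1/2/many), building the 'many' case with a single ", ".join over a slice.

-- ===== PORT A =====
def authorsListToTexString (authorsList : List String) : String :=
  let shortList := (PySem.List.remove? authorsList "Arturo Merino").getD []
  let n : Int := shortList.length
  (PySem.List.enumerate shortList).foldl
    (fun acc p =>
      if p.1 == 0 then acc ++ p.2
      else if p.1 < n - 1 then acc ++ ", " ++ p.2
      else if p.1 == n - 1 && n == 2 then acc ++ " and " ++ p.2
      else if p.1 == n - 1 && decide (n > 2) then acc ++ ", and " ++ p.2
      else acc) "with "

-- ===== PORT B =====
def authorsListToTexString_alt (authorsList : List String) : String :=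
  let shortList := (PySem.List.remove? authorsList "Arturo Merino").getD []
  let n : Int := shortList.length
  if n == 0 then "with "
  else if n == 1 then "with " ++ PySem.List.pyGetD shortList 0 ""
  else if n == 2 then
    "with " ++ PySem.List.pyGetD shortList 0 "" ++ " and " ++ PySem.List.pyGetD shortList 1 ""
  else
    "with " ++ PySem.Str.join ", " (PySem.List.slice shortList none (some (-1)))
      ++ ", and " ++ PySem.List.pyGetD shortList (-1) ""

-- ===== PRECONDITION & SPEC =====
-- Pre_ excludes exactly the inputs without "Arturo Merino", on which A's .remove raises ValueError.
def Pre_authorsListToTexString (authorsList : List String) : Prop :=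
  "Arturo Merino" ∈ authorsList
instance (authorsList : List String) : Decidable (Pre_authorsListToTexString authorsList) := by
  unfold Pre_authorsListToTexString; infer_instance
def pvWitness_authorsListToTexString : List String := ["Arturo Merino", "Alice", "Bob"]

def Spec_authorsListToTexString (authorsList : List String) (out : String) : Prop :=
  out = authorsListToTexString_alt authorsList
instance (authorsList : List String) (out : String) : Decidable (Spec_authorsListToTexString authorsList out) := by
  unfold Spec_authorsListToTexString; infer_instance

-- ===== CLAIM (what is proved, stated in full; the proofs are below) =====
def Claim_equal_authorsListToTexString : Prop := ∀ (authorsList : List String), Dom_authorsListToTexString authorsList → Pre_authorsListToTexString authorsList → Spec_authorsListToTexString authorsList (authorsListToTexString authorsList)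

-- ===== LEMMAS AND PROOFS =====

lemma str_join_singleton (sep p : String) : PySem.Str.join sep [p] = p := by
  apply String.toList_inj.mp
  simp [PySem.Str.toList_join, PySem.Chars.join_singleton]

lemma str_join_cons_cons (sep p q : String) (rest : List String) :
    PySem.Str.join sep (p :: q :: rest) = p ++ sep ++ PySem.Str.join sep (q :: rest) := by
  apply String.toList_inj.mp
  simp [PySem.Str.toList_join, String.toList_append, PySem.Chars.join_cons_cons]

/-- `acc + ", ".join([a] + m)` is the comma-fold over `m` started at `acc + a`. -/
lemma join_foldl (m : List String) (acc a : String) :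
    acc ++ PySem.Str.join ", " (a :: m) = m.foldl (fun b x => b ++ ", " ++ x) (acc ++ a) := by
  induction m generalizing acc a with
  | nil => rw [str_join_singleton, List.foldl_nil]
  | cons x m ih =>
      rw [str_join_cons_cons, List.foldl_cons, ← ih]
      simp [String.append_assoc]

/-- A's loop over the middle elements (index ≥ 1, strictly before the last) only takes the
    `", " + author` branch. -/
lemma foldA_mid (n : Int) (m : List String) (k : Int) (acc : String)
    (h1 : 1 ≤ k) (h2 : k + m.length ≤ n - 1) :
    (PySem.List.enumerate m k).foldl
      (fun acc p =>
        if p.1 == 0 then acc ++ p.2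
        else if p.1 < n - 1 then acc ++ ", " ++ p.2
        else if p.1 == n - 1 && n == 2 then acc ++ " and " ++ p.2
        else if p.1 == n - 1 && decide (n > 2) then acc ++ ", and " ++ p.2
        else acc) acc
    = m.foldl (fun b x => b ++ ", " ++ x) acc := by
  induction m generalizing k acc with
  | nil => simp [PySem.List.enumerate_nil]
  | cons x m ih =>
      rw [PySem.List.enumerate_cons, List.foldl_cons, List.foldl_cons]
      have hxm : (((x :: m).length : Nat) : Int) = (m.length : Int) + 1 := by simp
      have hl : (0:Int) ≤ (m.length : Int) := by positivity
      have c1 : (k == (0:Int)) = false := by simp; omega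
      have c2 : k < n - 1 := by omega
      simp only [c1, Bool.false_eq_true, if_false, if_pos c2]
      exact ih (k + 1) _ (by omega) (by omega)

lemma authors_core (s : List String) :
    (PySem.List.enumerate s).foldl
      (fun acc p =>
        if p.1 == 0 then acc ++ p.2
        else if p.1 < (s.length : Int) - 1 then acc ++ ", " ++ p.2
        else if p.1 == (s.length : Int) - 1 && (s.length : Int) == 2 then acc ++ " and " ++ p.2
        else if p.1 == (s.length : Int) - 1 && decide ((s.length : Int) > 2) then acc ++ ", and " ++ p.2
        else acc) "with "
    = (if (s.length : Int) == 0 then "with "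
      else if (s.length : Int) == 1 then "with " ++ PySem.List.pyGetD s 0 ""
      else if (s.length : Int) == 2 then
        "with " ++ PySem.List.pyGetD s 0 "" ++ " and " ++ PySem.List.pyGetD s 1 ""
      else
        "with " ++ PySem.Str.join ", " (PySem.List.slice s none (some (-1)))
          ++ ", and " ++ PySem.List.pyGetD s (-1) "") := by
  match s with
  | [] => simp [PySem.List.enumerate_nil]
  | [a] =>
      simp [PySem.List.enumerate_cons, PySem.List.enumerate_nil, PySem.List.pyGetD_zero_cons]
  | [a, b] =>
      norm_num [PySem.List.enumerate_cons, PySem.List.enumerate_nil]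
      simp [PySem.List.pyGetD, PySem.List.pyGet?, PySem.List.pyIdx?]
  | a :: b :: c :: rest =>
      have ht : (b :: c :: rest) ≠ [] := by simp
      have hrep : b :: c :: rest
          = (b :: c :: rest).dropLast ++ [(b :: c :: rest).getLast ht] :=
        (List.dropLast_append_getLast ht).symm
      generalize hm : (b :: c :: rest).dropLast = m at hrep
      generalize hz : (b :: c :: rest).getLast ht = z at hrep
      have hml : m.length = rest.length + 1 := by
        have := congrArg List.length hrep
        simp at this; omega
      rw [hrep]
      have hlen : (((a :: (m ++ [z])).length : Nat) : Int) = (m.length : Int) + 2 := by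
        simp; ring
      rw [PySem.List.enumerate_cons, List.foldl_cons, PySem.List.enumerate_append,
        List.foldl_append, PySem.List.enumerate_cons, PySem.List.enumerate_nil]
      simp only [zero_add]
      rw [foldA_mid (((a :: (m ++ [z])).length : Nat) : Int) m 1 _ (by norm_num)
        (by rw [hlen]; omega)]
      have hm1 : (1:Int) ≤ (m.length : Int) := by simp [hml]
      simp only [hlen]
      rw [List.foldl_cons, List.foldl_nil]
      simp only [← List.cons_append, PySem.List.slice_to_neg_one, List.dropLast_concat,
        PySem.List.pyGetD_neg_one_append_singleton]
      norm_num
      have hmne : m ≠ [] := by intro h; rw [h] at hm1; simp at hm1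
      rw [join_foldl]
      split_ifs <;> first | rfl | omega | simp_all

theorem authorsListToTexString_spec : Claim_equal_authorsListToTexString := by
  intro l _ _
  exact authors_core ((PySem.List.remove? l "Arturo Merino").getD [])
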